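-- pv_equiv track=rewrite | github.com/Stallion77RepoOfficial/binfreak | binfreak/binfreak/analysis/decompiler_engine.py | _analyze_control_flow_patterns
-- ===== SOURCE A (Python) =====
-- from typing import Dict, Any, List
--
-- def _analyze_control_flow_patterns(instructions: List[Dict[str, Any]]) -> Dict[str, Any]:
--     """Analyze control flow patterns"""
--     cf = {'branches': 0, 'loops': 0, 'conditions': 0}
--
--     for instr in instructions:
--         mnemonic = instr.get('mnemonic', '').lower()
--         if mnemonic.startswith('j') and mnemonic != 'jmp':  # Conditional jumps
--             cf['conditions'] += 1
--         elif mnemonic == 'jmp':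
--             cf['branches'] += 1
--         elif mnemonic in ['loop', 'loope', 'loopne']:
--             cf['loops'] += 1
--
--     return cf
-- ===== SOURCE B (Python) =====
-- def _analyze_control_flow_patterns(instructions):
--     """Analyze control flow patterns: tally distinct mnemonics once, then aggregate."""
--     tally = {}
--     for instr in instructions:
--         m = instr.get('mnemonic', '').lower()
--         tally[m] = tally.get(m, 0) + 1
--     return {
--         'branches': tally.get('jmp', 0),
--         'loops': sum(n for m, n in tally.items() if m in ('loop', 'loope', 'loopne')),
--         'conditions': sum(n for m, n in tally.items() if m.startswith('j') and m != 'jmp'),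
--     }
-- ===== Notes on version B (the rewrite author's own statement) =====
-- stated objective: idiomatic
-- what changed: B replaces A's per-instruction if/elif classification into three running counters by a tally-then-aggregate scheme: one pass builds a frequency dict of lowercased mnemonics, and each of the three results is then read off the distinct keys (a lookup for 'jmp', two sums over the tally's items).
import Mathlib
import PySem

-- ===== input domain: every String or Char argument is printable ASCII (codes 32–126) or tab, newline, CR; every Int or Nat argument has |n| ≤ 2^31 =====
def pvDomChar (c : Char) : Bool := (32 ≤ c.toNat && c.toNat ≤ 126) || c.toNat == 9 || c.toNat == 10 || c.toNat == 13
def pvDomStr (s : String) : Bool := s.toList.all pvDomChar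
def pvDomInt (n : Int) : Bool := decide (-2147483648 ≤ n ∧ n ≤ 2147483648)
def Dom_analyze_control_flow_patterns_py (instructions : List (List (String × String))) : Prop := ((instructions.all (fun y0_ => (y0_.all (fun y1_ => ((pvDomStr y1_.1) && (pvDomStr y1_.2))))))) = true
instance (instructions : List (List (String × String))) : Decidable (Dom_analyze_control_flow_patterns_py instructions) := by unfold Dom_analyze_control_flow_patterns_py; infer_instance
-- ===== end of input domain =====

-- B replaces A's per-instruction if/elif classification into three running counters by a
-- tally-then-aggregate scheme (one pass builds a frequency dict of lowercased mnemonics, the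
-- three results are read off the distinct keys); objective: idiomatic, not faster.

-- ===== PORT A =====
-- A's dict cf has three fixed keys created up front and only incremented, so it is represented
-- as a triple (branches, loops, conditions) in insertion order, emitted as the items list.
def analyze_control_flow_patterns_py (instructions : List (List (String × String))) : List (String × Int) :=
  let cf := instructions.foldl (fun (cf : Int × Int × Int) instr =>
      let mnemonic := PySem.Str.lower ((PySem.Dict.mk instr).getD "mnemonic" "")
      if PySem.Str.startswith mnemonic "j" && mnemonic != "jmp" then
        (cf.1, cf.2.1, cf.2.2 + 1)
      else if mnemonic == "jmp" then
        (cf.1 + 1, cf.2.1, cf.2.2)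
      else if mnemonic == "loop" || mnemonic == "loope" || mnemonic == "loopne" then
        (cf.1, cf.2.1 + 1, cf.2.2)
      else cf) (0, 0, 0)
  [("branches", cf.1), ("loops", cf.2.1), ("conditions", cf.2.2)]

-- ===== PORT B =====
def analyze_control_flow_patterns_py_alt (instructions : List (List (String × String))) : List (String × Int) :=
  let tally := instructions.foldl (fun (d : PySem.Dict String Int) instr =>
      let m := PySem.Str.lower ((PySem.Dict.mk instr).getD "mnemonic" "")
      d.insert m (d.getD m 0 + 1)) PySem.Dict.empty
  [("branches", tally.getD "jmp" 0),
   ("loops", (tally.items.filter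
        (fun p => p.1 == "loop" || p.1 == "loope" || p.1 == "loopne")).foldl
        (fun s p => s + p.2) 0),
   ("conditions", (tally.items.filter
        (fun p => PySem.Str.startswith p.1 "j" && p.1 != "jmp")).foldl
        (fun s p => s + p.2) 0)]

-- ===== PRECONDITION & SPEC =====
def Spec_analyze_control_flow_patterns_py (instructions : List (List (String × String))) (out : List (String × Int)) : Prop := out = analyze_control_flow_patterns_py_alt instructions
instance (instructions : List (List (String × String))) (out : List (String × Int)) : Decidable (Spec_analyze_control_flow_patterns_py instructions out) := by unfold Spec_analyze_control_flow_patterns_py; infer_instance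

-- ===== CLAIM (what is proved, stated in full; the proofs are below) =====
def Claim_equal_analyze_control_flow_patterns_py : Prop := ∀ (instructions : List (List (String × String))), Dom_analyze_control_flow_patterns_py instructions → Spec_analyze_control_flow_patterns_py instructions (analyze_control_flow_patterns_py instructions)

-- ===== LEMMAS AND PROOFS =====

-- the shared per-instruction mnemonic extraction
def pvMnem (instr : List (String × String)) : String :=
  PySem.Str.lower ((PySem.Dict.mk instr).getD "mnemonic" "")

def pvIsLoop (m : String) : Bool := m == "loop" || m == "loope" || m == "loopne"
def pvIsCond (m : String) : Bool := PySem.Str.startswith m "j" && m != "jmp"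

lemma pvIsLoop_not_cond {m : String} (h : pvIsLoop m = true) : pvIsCond m = false := by
  unfold pvIsLoop at h
  rcases Bool.or_eq_true_iff.mp h with h | h
  · rcases Bool.or_eq_true_iff.mp h with h | h <;> simp only [beq_iff_eq] at h <;> subst h <;> decide
  · simp only [beq_iff_eq] at h; subst h; decide

-- A's fold computes the three per-category counts
lemma A_fold_char (instructions : List (List (String × String))) (b l c : Int) :
    instructions.foldl (fun (cf : Int × Int × Int) instr =>
      let mnemonic := pvMnem instr
      if pvIsCond mnemonic then (cf.1, cf.2.1, cf.2.2 + 1)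
      else if mnemonic == "jmp" then (cf.1 + 1, cf.2.1, cf.2.2)
      else if pvIsLoop mnemonic then (cf.1, cf.2.1 + 1, cf.2.2)
      else cf) (b, l, c)
    = (b + ((instructions.map pvMnem).count "jmp" : Int),
       l + ((instructions.map pvMnem).countP pvIsLoop : Int),
       c + ((instructions.map pvMnem).countP pvIsCond : Int)) := by
  induction instructions generalizing b l c with
  | nil => simp
  | cons i rest ih =>
    simp only [List.foldl_cons, List.map_cons]
    by_cases hC : pvIsCond (pvMnem i) = true
    · have hJ : (pvMnem i == "jmp") = false := by
        unfold pvIsCond at hC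
        rcases Bool.and_eq_true_iff.mp hC with ⟨_, h2⟩
        simpa using h2
      have hL : pvIsLoop (pvMnem i) = false := by
        cases h : pvIsLoop (pvMnem i)
        · rfl
        · rw [pvIsLoop_not_cond h] at hC; cases hC
      simp only [if_true, ih, List.count_cons, List.countP_cons, hC, hJ, hL,
        if_false, Bool.false_eq_true]
      refine Prod.ext ?_ (Prod.ext ?_ ?_) <;> simp <;> ring
    · by_cases hJ : (pvMnem i == "jmp") = true
      · have hL : pvIsLoop (pvMnem i) = false := by
          have : pvMnem i = "jmp" := by simpa using hJ
          rw [this]; decide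
        simp only [hC, hJ, hL, if_true, if_false, Bool.false_eq_true, ih,
          List.count_cons, List.countP_cons]
        push_cast
        refine Prod.ext ?_ (Prod.ext ?_ ?_) <;> simp <;> ring
      · by_cases hL : pvIsLoop (pvMnem i) = true
        · simp only [hC, hJ, hL, if_true, if_false, Bool.false_eq_true, ih,
            List.count_cons, List.countP_cons]
          push_cast
          refine Prod.ext ?_ (Prod.ext ?_ ?_) <;> simp <;> ring
        · simp only [hC, hJ, hL, if_false, Bool.false_eq_true, ih,
            List.count_cons, List.countP_cons]
          push_cast
          refine Prod.ext ?_ (Prod.ext ?_ ?_) <;>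
            simp

-- over a Nodup key list, summing each key's multiplicity in ms counts ms's members of the key list
lemma pv_sum_counts (P : String → Bool) (l : List String) (hl : l.Nodup) (ms : List String) :
    ((l.filter P).map (fun k => (ms.count k : Int))).sum
      = ((ms.countP (fun x => decide (x ∈ l) && P x) : Nat) : Int) := by
  induction ms with
  | nil => simp
  | cons x ms ih =>
    simp only [List.count_cons, List.countP_cons]
    have split : ((l.filter P).map (fun k => ((ms.count k : Int) + if (x == k) then 1 else 0))).sum
        = ((l.filter P).map (fun k => (ms.count k : Int))).sum
          + ((l.filter P).map (fun k => if (x == k) then (1:Int) else 0)).sum := by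
      rw [PySem.List.sum_map_add_int]
    have ind : ((l.filter P).map (fun k => if (x == k) then (1:Int) else 0)).sum
        = if (decide (x ∈ l) && P x) then 1 else 0 := by
      rw [PySem.List.sum_map_ite_one_zero]
      have hcc : List.countP (fun k => x == k) (l.filter P) = List.count x (l.filter P) := by
        rw [List.count_eq_countP]
        exact List.countP_congr (fun k _ => by simp only [beq_iff_eq]; exact eq_comm)
      rw [hcc]
      by_cases hx : x ∈ l.filter P
      · rw [List.count_eq_one_of_mem (hl.filter P) hx]
        rw [List.mem_filter] at hx
        simp [hx.1, hx.2]
      · rw [List.count_eq_zero_of_not_mem hx]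
        rw [List.mem_filter] at hx
        have : ¬ (x ∈ l ∧ P x = true) := hx
        by_cases h1 : x ∈ l <;> by_cases h2 : P x = true <;> simp [h1, h2] at this ⊢
    have conv1 : ((l.filter P).map (fun k => ((ms.count k + if (x == k) = true then 1 else 0 : Nat) : Int))).sum
        = ((l.filter P).map (fun k => ((ms.count k : Int) + if (x == k) then 1 else 0))).sum := by
      apply congrArg; apply List.map_congr_left; intro k _; push_cast; split <;> simp
    rw [conv1, split, ind, ih]
    split <;> push_cast <;> ring

-- B's tally is the Counter of the mnemonic list
lemma B_tally (instructions : List (List (String × String))) :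
    instructions.foldl (fun (d : PySem.Dict String Int) instr =>
      let m := pvMnem instr
      d.insert m (d.getD m 0 + 1)) PySem.Dict.empty
    = PySem.Dict.counter (instructions.map pvMnem) := by
  rw [← PySem.Dict.foldl_insert_getD_add_one_eq_counter, List.foldl_map]

-- a filtered-items sum over the Counter is the corresponding countP of the underlying list
lemma pv_counter_sum (P : String → Bool) (ms : List String) :
    (((PySem.Dict.counter ms).items.filter (fun p => P p.1)).foldl (fun s p => s + p.2) 0 : Int)
      = ((ms.countP P : Nat) : Int) := by
  rw [PySem.Dict.items_counter, List.filter_map]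
  rw [show ((fun (p : String × Int) => P p.1) ∘ fun k => (k, (ms.count k : Int))) = P from rfl]
  rw [PySem.List.foldl_add, List.map_map]
  rw [show ((fun (p : String × Int) => p.2) ∘ fun k => (k, (ms.count k : Int)))
        = fun k => (ms.count k : Int) from rfl]
  rw [pv_sum_counts P (PySem.Set.ofList ms) (PySem.Set.nodup_ofList ms) ms]
  have : ms.countP (fun x => decide (x ∈ PySem.Set.ofList ms) && P x) = ms.countP P := by
    apply List.countP_congr
    intro x hx
    simp [PySem.Set.mem_ofList, hx]
  rw [zero_add]; exact_mod_cast this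

-- ===== VERDICT (by name: the statement is the Claim_ definition above) =====
theorem analyze_control_flow_patterns_py_spec : Claim_equal_analyze_control_flow_patterns_py := by
  intro instructions _
  unfold Spec_analyze_control_flow_patterns_py
  unfold analyze_control_flow_patterns_py analyze_control_flow_patterns_py_alt
  rw [show (fun (d : PySem.Dict String Int) (instr : List (String × String)) =>
        let m := PySem.Str.lower ((PySem.Dict.mk instr).getD "mnemonic" "")
        d.insert m (d.getD m 0 + 1))
      = (fun (d : PySem.Dict String Int) instr =>
        let m := pvMnem instr
        d.insert m (d.getD m 0 + 1)) from rfl]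
  rw [B_tally]
  rw [show (fun (cf : Int × Int × Int) (instr : List (String × String)) =>
        let mnemonic := PySem.Str.lower ((PySem.Dict.mk instr).getD "mnemonic" "")
        if PySem.Str.startswith mnemonic "j" && mnemonic != "jmp" then (cf.1, cf.2.1, cf.2.2 + 1)
        else if mnemonic == "jmp" then (cf.1 + 1, cf.2.1, cf.2.2)
        else if mnemonic == "loop" || mnemonic == "loope" || mnemonic == "loopne" then
          (cf.1, cf.2.1 + 1, cf.2.2)
        else cf)
      = (fun (cf : Int × Int × Int) instr =>
        let mnemonic := pvMnem instr
        if pvIsCond mnemonic then (cf.1, cf.2.1, cf.2.2 + 1)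
        else if mnemonic == "jmp" then (cf.1 + 1, cf.2.1, cf.2.2)
        else if pvIsLoop mnemonic then (cf.1, cf.2.1 + 1, cf.2.2)
        else cf) from rfl]
  rw [A_fold_char]
  have hLoops := pv_counter_sum (fun m => m == "loop" || m == "loope" || m == "loopne")
    (instructions.map pvMnem)
  have hConds := pv_counter_sum (fun m => PySem.Str.startswith m "j" && m != "jmp")
    (instructions.map pvMnem)
  simp only [hLoops, hConds, PySem.Dict.getD_counter, zero_add]
  simp only [List.countP_map]
  exact rfl
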